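-- pv_equiv track=rewrite | github.com/spwpun/CTF | AngostormCTF 2022/caniride.py | get_shorts
-- ===== SOURCE A (Python) =====
-- def get_shorts(target_value):
--     shorts = []
--     curr = 0
--     for _ in range(4):
--         num = target_value % 65536
--         desired_value = (num - curr + 65536) % 65536
--         shorts.append(desired_value)
--         curr = (curr + desired_value) % 65536
--         target_value = target_value >> 16
--     return shorts
-- ===== SOURCE B (Python) =====
-- def get_shorts(target_value):
--     # Closed form: each output depends on just two raw arithmetic shifts of the
--     # input, via the congruence (v >> 16*i) == chunk_i (mod 65536) and
--     # curr_i == chunk_{i-1} (mod 65536); no chunk extraction, no running state.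
--     return [((target_value >> 16 * i) - (target_value >> 16 * (i - 1) if i else 0)) % 65536
--             for i in range(4)]
-- ===== Notes on version B (the rewrite author's own statement) =====
-- stated objective: simpler
-- what changed: Replaces A's stateful loop (masked chunk, running curr accumulator, shifting the value in place) by a stateless closed form: each of the four outputs is computed directly from two raw arithmetic shifts of the input, using the congruence (v >> 16*i) ≡ chunk_i (mod 65536), so no chunks are extracted and no sequential state is threaded.
import Mathlib
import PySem

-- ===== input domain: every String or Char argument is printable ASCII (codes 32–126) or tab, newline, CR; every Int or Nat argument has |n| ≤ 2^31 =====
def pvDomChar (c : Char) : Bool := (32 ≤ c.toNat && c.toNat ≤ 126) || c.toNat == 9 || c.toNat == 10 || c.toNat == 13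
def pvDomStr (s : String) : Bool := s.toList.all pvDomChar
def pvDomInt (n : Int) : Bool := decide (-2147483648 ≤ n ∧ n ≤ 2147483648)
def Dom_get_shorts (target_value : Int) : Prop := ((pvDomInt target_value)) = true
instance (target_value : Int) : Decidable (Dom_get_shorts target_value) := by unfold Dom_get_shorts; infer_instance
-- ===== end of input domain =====

-- B replaces A's stateful loop (masked chunk, running curr accumulator) by a stateless
-- closed form: each output is (v>>16i - v>>16(i-1)) % 65536 directly from raw shifts: simpler.


-- ===== PORT A =====
-- loop state (shorts, curr, tv); body: num = tv % 65536; desired = (num - curr + 65536) % 65536;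
-- shorts.append(desired); curr = (curr + desired) % 65536; tv = tv >> 16
def get_shorts (target_value : Int) : List Int :=
  let st := (List.range 4).foldl
    (fun (st : List Int × Int × Int) _ =>
      let num := PySem.Int.mod st.2.2 65536
      let desired_value := PySem.Int.mod (num - st.2.1 + 65536) 65536
      (st.1 ++ [desired_value], PySem.Int.mod (st.2.1 + desired_value) 65536,
        PySem.Int.floordiv st.2.2 65536))
    ([], 0, target_value)
  st.1

-- ===== PORT B =====
-- [((v >> 16*i) - (v >> 16*(i-1) if i else 0)) % 65536 for i in range(4)]
def get_shorts_alt (target_value : Int) : List Int :=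
  (List.range 4).map (fun i =>
    PySem.Int.mod
      (PySem.Int.floordiv target_value (2 ^ (16 * i)) -
        (if i = 0 then 0 else PySem.Int.floordiv target_value (2 ^ (16 * (i - 1)))))
      65536)

-- ===== PRECONDITION & SPEC =====
def Spec_get_shorts (target_value : Int) (out : List Int) : Prop := out = get_shorts_alt target_value
instance (target_value : Int) (out : List Int) : Decidable (Spec_get_shorts target_value out) := by unfold Spec_get_shorts; infer_instance

-- ===== CLAIM (what is proved, stated in full; the proofs are below) =====
def Claim_equal_get_shorts : Prop := ∀ (target_value : Int), Dom_get_shorts target_value → Spec_get_shorts target_value (get_shorts target_value)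

-- ===== LEMMAS AND PROOFS =====

theorem pvModE (a : Int) : PySem.Int.mod a 65536 = a % 65536 :=
  PySem.Int.mod_eq_emod_of_pos (by norm_num)
theorem pvDivE (a : Int) (i : Nat) : PySem.Int.floordiv a (2 ^ (16 * i)) = a / (2 ^ (16 * i)) :=
  PySem.Int.floordiv_eq_ediv_of_pos (by positivity)

-- ===== VERDICT (by name: the statement is the Claim_ definition above) =====
theorem get_shorts_spec : Claim_equal_get_shorts := by
  intro x _
  show get_shorts x = get_shorts_alt x
  simp only [get_shorts, get_shorts_alt, List.range, List.range.loop, List.foldl, List.map,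
    pvModE, pvDivE, PySem.Int.floordiv_eq_ediv_of_pos (a := x) (by norm_num : (0:Int) < 65536)]
  norm_num [List.cons.injEq]
  omega
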